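-- pv_equiv track=rewrite | github.com/Zeydel/Everybody-Codes | The Kingdom of Algorithmia/Quest08/Quest08_part3.py | get_blocks_for_structure
-- ===== SOURCE A (Python) =====
-- def get_blocks_for_structure(structure, num_priests, num_acolytes):
--
--     # Init number of blocks to remove
--     blocks_to_remove = 0
--
--     # Take the width of the structure
--     width = len(structure)
--
--     # Init the rolling height
--     rolling_height = structure[0]
--
--     # Init the number of blocks it takes to fill out the whole structure
--     blocks = 2*rolling_height
--
--     # For every column after the first one, to the one just before the center
--     for column in structure[1:len(structure)//2]:
--
--         # Add the column height to the rolling total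
--         rolling_height += column
--
--         # Add double that to the number of blocks
--         blocks += rolling_height*2
--
--         # Calculate the number of blocks to remove and add to total
--         blocks_to_remove += ((num_priests * width * rolling_height) % num_acolytes) * 2
--
--     # Add the middle column to the rolling height
--     rolling_height += structure[len(structure) // 2]
--
--     # Update the total number of blocks needed
--     blocks += rolling_height
--
--     # Update the number of blocks to remove
--     blocks_to_remove += ((num_priests * width * rolling_height) % num_acolytes)
--
--     # Return the number of blocks needed after removal
--     return blocks - blocks_to_remove
-- ===== SOURCE B (Python) =====
-- def get_blocks_for_structure(structure, num_priests, num_acolytes):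
--     # Prefix-sum decomposition: build the cumulative-height list H for the
--     # columns up to the center, then compute blocks and removals in two passes.
--     width = len(structure)
--     cols = [structure[0]] + structure[1:width // 2] + [structure[width // 2]]
--     H = []
--     total = 0
--     for c in cols:
--         total += c
--         H.append(total)
--     blocks = 2 * sum(H[:-1]) + H[-1]
--     k = num_priests * width
--     remove = 2 * sum((k * h) % num_acolytes for h in H[1:-1]) + (k * H[-1]) % num_acolytes
--     return blocks - remove
-- ===== Notes on version B (the rewrite author's own statement) =====
-- stated objective: alternative
-- what changed: Replaces A's single fused loop with three mutable accumulators by a prefix-sum decomposition: first build the explicit cumulative-height list H over the relevant columns, then compute the block total and the removal total in two separate passes over H.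
import Mathlib
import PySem

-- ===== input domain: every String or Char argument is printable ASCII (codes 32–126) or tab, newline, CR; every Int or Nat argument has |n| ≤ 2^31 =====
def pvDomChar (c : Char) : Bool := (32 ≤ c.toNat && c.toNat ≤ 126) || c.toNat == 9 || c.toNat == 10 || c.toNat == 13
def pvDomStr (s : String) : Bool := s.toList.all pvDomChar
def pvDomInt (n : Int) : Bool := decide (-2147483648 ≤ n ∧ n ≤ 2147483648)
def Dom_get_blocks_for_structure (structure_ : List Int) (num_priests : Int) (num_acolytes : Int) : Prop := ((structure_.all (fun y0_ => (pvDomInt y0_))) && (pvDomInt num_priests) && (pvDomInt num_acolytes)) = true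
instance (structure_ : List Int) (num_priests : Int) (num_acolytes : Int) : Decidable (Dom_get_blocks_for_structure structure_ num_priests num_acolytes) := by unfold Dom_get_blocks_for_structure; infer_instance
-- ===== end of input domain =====

-- B replaces A's fused loop (three running accumulators) by a prefix-sum list H built once,
-- followed by two separate summation passes over H; objective: alternative decomposition (same cost).

-- ===== PORT A =====
def get_blocks_for_structure (structure_ : List Int) (num_priests : Int) (num_acolytes : Int) : Int :=
  let width : Int := structure_.length
  let rolling_height0 : Int := (PySem.List.pyGet? structure_ 0).getD 0
  let blocks0 : Int := 2 * rolling_height0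
  -- state: (blocks_to_remove, rolling_height, blocks)
  let st := (PySem.List.slice structure_ (some 1) (some (PySem.Int.floordiv structure_.length 2))).foldl
    (fun (st : Int × Int × Int) column =>
      let rolling_height := st.2.1 + column
      (st.1 + (PySem.Int.mod (num_priests * width * rolling_height) num_acolytes) * 2,
       rolling_height,
       st.2.2 + rolling_height * 2))
    (0, rolling_height0, blocks0)
  let rolling_height : Int := st.2.1 + (PySem.List.pyGet? structure_ (PySem.Int.floordiv structure_.length 2)).getD 0
  let blocks : Int := st.2.2 + rolling_height
  let blocks_to_remove : Int := st.1 + PySem.Int.mod (num_priests * width * rolling_height) num_acolytes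
  blocks - blocks_to_remove

-- ===== PORT B =====
def get_blocks_for_structure_alt (structure_ : List Int) (num_priests : Int) (num_acolytes : Int) : Int :=
  let width : Int := structure_.length
  let cols : List Int :=
    [(PySem.List.pyGet? structure_ 0).getD 0]
      ++ PySem.List.slice structure_ (some 1) (some (PySem.Int.floordiv structure_.length 2))
      ++ [(PySem.List.pyGet? structure_ (PySem.Int.floordiv structure_.length 2)).getD 0]
  let H : List Int := (cols.foldl (fun (st : Int × List Int) c => (st.1 + c, st.2 ++ [st.1 + c])) (0, [])).2
  let blocks : Int := 2 * (PySem.List.slice H none (some (-1))).sum + (PySem.List.pyGet? H (-1)).getD 0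
  let k : Int := num_priests * width
  let remove : Int :=
    2 * ((PySem.List.slice H (some 1) (some (-1))).map (fun h => PySem.Int.mod (k * h) num_acolytes)).sum
      + PySem.Int.mod (k * ((PySem.List.pyGet? H (-1)).getD 0)) num_acolytes
  blocks - remove

-- ===== PRECONDITION & SPEC =====
-- Pre_ excludes exactly the inputs on which A raises: the empty list (IndexError on structure[0])
-- and num_acolytes = 0 (ZeroDivisionError in '%').
def Pre_get_blocks_for_structure (structure_ : List Int) (num_priests : Int) (num_acolytes : Int) : Prop :=
  structure_ ≠ [] ∧ num_acolytes ≠ 0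
instance (structure_ : List Int) (num_priests : Int) (num_acolytes : Int) : Decidable (Pre_get_blocks_for_structure structure_ num_priests num_acolytes) := by unfold Pre_get_blocks_for_structure; infer_instance

def pvWitness_get_blocks_for_structure : List Int × Int × Int := ([3, 1, 2], 5, 7)

def Spec_get_blocks_for_structure (structure_ : List Int) (num_priests : Int) (num_acolytes : Int) (out : Int) : Prop := out = get_blocks_for_structure_alt structure_ num_priests num_acolytes
instance (structure_ : List Int) (num_priests : Int) (num_acolytes : Int) (out : Int) : Decidable (Spec_get_blocks_for_structure structure_ num_priests num_acolytes out) := by unfold Spec_get_blocks_for_structure; infer_instance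

-- ===== CLAIM (what is proved, stated in full; the proofs are below) =====
def Claim_equal_get_blocks_for_structure : Prop := ∀ (structure_ : List Int) (num_priests : Int) (num_acolytes : Int), Dom_get_blocks_for_structure structure_ num_priests num_acolytes → Pre_get_blocks_for_structure structure_ num_priests num_acolytes → Spec_get_blocks_for_structure structure_ num_priests num_acolytes (get_blocks_for_structure structure_ num_priests num_acolytes)

-- ===== LEMMAS AND PROOFS =====

-- Running prefix sums starting after r (the sequence of A's rolling_height values over a list).
def pvPrefixAcc (r : Int) : List Int → List Int
  | [] => []
  | c :: t => (r + c) :: pvPrefixAcc (r + c) t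

theorem pvPrefixAcc_append (r : Int) (l1 l2 : List Int) :
    pvPrefixAcc r (l1 ++ l2) = pvPrefixAcc r l1 ++ pvPrefixAcc (r + l1.sum) l2 := by
  induction l1 generalizing r with
  | nil => simp [pvPrefixAcc]
  | cons c t ih => simp [pvPrefixAcc, ih, add_assoc]

theorem pvPrefixAcc_length (r : Int) (l : List Int) : (pvPrefixAcc r l).length = l.length := by
  induction l generalizing r with
  | nil => rfl
  | cons c t ih => simp [pvPrefixAcc, ih]

-- A's fused loop, characterised by the prefix-sum list.
theorem pvFoldA (num_priests num_acolytes width : Int) (l : List Int) (rem r b : Int) :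
    l.foldl
      (fun (st : Int × Int × Int) column =>
        let rolling_height := st.2.1 + column
        (st.1 + (PySem.Int.mod (num_priests * width * rolling_height) num_acolytes) * 2,
         rolling_height,
         st.2.2 + rolling_height * 2))
      (rem, r, b)
    = (rem + ((pvPrefixAcc r l).map (fun h => PySem.Int.mod (num_priests * width * h) num_acolytes)).sum * 2,
       r + l.sum,
       b + (pvPrefixAcc r l).sum * 2) := by
  induction l generalizing rem r b with
  | nil => simp [pvPrefixAcc]
  | cons c t ih =>
      simp only [List.foldl_cons, ih, pvPrefixAcc, List.map_cons, List.sum_cons]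
      refine Prod.ext ?_ (Prod.ext ?_ ?_) <;> simp <;> ring

-- B's H-building loop produces the prefix-sum list.
theorem pvFoldB (l : List Int) (t : Int) (acc : List Int) :
    (l.foldl (fun (st : Int × List Int) c => (st.1 + c, st.2 ++ [st.1 + c])) (t, acc)).2
      = acc ++ pvPrefixAcc t l := by
  induction l generalizing t acc with
  | nil => simp [pvPrefixAcc]
  | cons c tl ih => simp [pvPrefixAcc, ih]

-- ===== VERDICT (by name: the statement is the Claim_ definition above) =====
theorem get_blocks_for_structure_spec : Claim_equal_get_blocks_for_structure := by
  intro s p a _ _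
  unfold Spec_get_blocks_for_structure get_blocks_for_structure get_blocks_for_structure_alt
  set w : Int := (s.length : Int) with hw
  set g0 : Int := (PySem.List.pyGet? s 0).getD 0 with hg0
  set mid : List Int := PySem.List.slice s (some 1) (some (PySem.Int.floordiv s.length 2)) with hmid
  set gc : Int := (PySem.List.pyGet? s (PySem.Int.floordiv s.length 2)).getD 0 with hgc
  simp only [pvFoldA, pvFoldB, List.nil_append]
  -- B's H in explicit shape
  have hH : pvPrefixAcc 0 ([g0] ++ mid ++ [gc])
      = g0 :: (pvPrefixAcc g0 mid ++ [g0 + mid.sum + gc]) := by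
    rw [pvPrefixAcc_append, pvPrefixAcc_append]
    simp [pvPrefixAcc, add_assoc]
  rw [hH]
  -- slices and last element of H
  rw [PySem.List.slice_to_neg_one]
  have hlast : PySem.List.pyGet? (g0 :: (pvPrefixAcc g0 mid ++ [g0 + mid.sum + gc])) (-1)
      = some (g0 + mid.sum + gc) := by
    rw [PySem.List.pyGet?_neg_one, ← List.cons_append, List.getLast?_concat]
  have hmidslice : PySem.List.slice (g0 :: (pvPrefixAcc g0 mid ++ [g0 + mid.sum + gc])) (some 1) (some (-1))
      = pvPrefixAcc g0 mid := by
    have ha : PySem.List.clampIdx (g0 :: (pvPrefixAcc g0 mid ++ [g0 + mid.sum + gc])).length 1 = 1 := by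
      simp [PySem.List.clampIdx]
    have hb : PySem.List.clampIdx (g0 :: (pvPrefixAcc g0 mid ++ [g0 + mid.sum + gc])).length (-1)
        = mid.length + 1 := by
      have hlen : (g0 :: (pvPrefixAcc g0 mid ++ [g0 + mid.sum + gc])).length = mid.length + 2 := by
        simp [pvPrefixAcc_length]
      rw [PySem.List.clampIdx_neg_one, hlen]; omega
    rw [PySem.List.slice]
    simp only [ha, hb, Nat.add_sub_cancel, List.drop_one, List.tail_cons]
    rw [show mid.length = (pvPrefixAcc g0 mid).length from (pvPrefixAcc_length g0 mid).symm]
    exact List.take_left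
  rw [hlast, hmidslice]
  have hdl : (g0 :: (pvPrefixAcc g0 mid ++ [g0 + mid.sum + gc])).dropLast = g0 :: pvPrefixAcc g0 mid := by
    rw [← List.cons_append, List.dropLast_concat]
  rw [hdl]
  simp only [List.sum_cons, Option.getD_some]
  ring
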